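-- pv_equiv track=rewrite | github.com/scuri-patrick/rcc_risk_prediction_ml | 04_survival_models/src/uc2_functions.py | replace_longest_match
-- ===== SOURCE A (Python) =====
-- def replace_longest_match(value, dict_legend):
--     """Replaces the beginning of a string based on the longest matching key in a dictionary.
--     Useful for variables expanded through one-hot encoding."""
--
--     # Sort the keys of the dictionary in descending order of their length
--     sorted_keys = sorted(dict_legend.keys(), key=len, reverse=True)
--
--     for key in sorted_keys:
--         if value.startswith(key):
--             # Extract the suffix
--             suffix = value[len(key) + 1 :]
--
--             # Format the replacement with the suffix, separated by a space if the suffix is not empty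
--             replacement = dict_legend.get(key, key)
--             return f"{replacement} {suffix}".strip() if suffix else replacement
--
--     # Return the original value if no match is found
--     return value
-- ===== SOURCE B (Python) =====
-- def replace_longest_match(value, dict_legend):
--     """Replaces the beginning of a string based on the longest matching key in a dictionary.
--     Useful for variables expanded through one-hot encoding."""
--
--     # Try candidate prefixes of value from longest to shortest; the first one that
--     # is a dictionary key is the longest matching key (i = 0 covers an empty key).
--     for i in range(len(value), -1, -1):
--         prefix = value[:i]
--         if prefix in dict_legend:
--             suffix = value[i + 1:]
--             replacement = dict_legend[prefix]
--             return f"{replacement} {suffix}".strip() if suffix else replacement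
--
--     return value
-- ===== Notes on version B (the rewrite author's own statement) =====
-- stated objective: alternative
-- what changed: Instead of sorting the dictionary's key set by length and scanning it for a key the value starts with, B enumerates the prefixes of value itself from longest to shortest and takes the first one that is a dictionary key (constant-time membership), so the key set is never sorted or scanned.
import Mathlib
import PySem

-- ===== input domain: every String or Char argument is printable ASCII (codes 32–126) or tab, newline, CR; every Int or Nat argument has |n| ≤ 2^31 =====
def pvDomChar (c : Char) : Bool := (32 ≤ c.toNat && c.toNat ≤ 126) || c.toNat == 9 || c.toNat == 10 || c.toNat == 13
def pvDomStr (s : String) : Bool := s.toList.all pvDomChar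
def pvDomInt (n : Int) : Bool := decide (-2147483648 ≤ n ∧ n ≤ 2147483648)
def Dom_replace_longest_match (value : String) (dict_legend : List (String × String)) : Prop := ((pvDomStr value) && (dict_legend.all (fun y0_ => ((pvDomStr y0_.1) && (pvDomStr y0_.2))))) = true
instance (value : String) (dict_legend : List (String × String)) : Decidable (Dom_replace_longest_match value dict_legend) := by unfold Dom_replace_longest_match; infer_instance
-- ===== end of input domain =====

-- B replaces A's sort-the-keys-and-scan loop by enumerating the prefixes of `value`
-- itself from longest to shortest and taking the first one that is a dictionary key
-- (objective: alternative algorithm; same observable behaviour).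

-- ===== PORT A =====
-- A's loop over the keys sorted by length, longest first; `List.lookup` is the
-- Python dict lookup (keys of a Python dict are unique, so first match is exact).
def pvGoA (v : List Char) (d : List (List Char × List Char)) : List (List Char) → List Char
  | [] => v
  | k :: rest =>
    if PySem.Chars.startswith v k then
      let suffix := PySem.List.slice v (some ((k.length : Int) + 1)) none   -- value[len(key)+1:]
      let replacement := (d.lookup k).getD k                                 -- dict_legend.get(key, key)
      if suffix ≠ [] then PySem.Chars.strip (replacement ++ ' ' :: suffix) else replacement
    else pvGoA v d rest

def replace_longest_match (value : String) (dict_legend : List (String × String)) : String :=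
  let d := dict_legend.map fun p => (p.1.toList, p.2.toList)
  -- sorted(dict_legend.keys(), key=len, reverse=True)
  let sorted_keys := PySem.List.sorted (d.map Prod.fst) List.length true
  String.ofList (pvGoA value.toList d sorted_keys)

-- ===== PORT B =====
-- B's countdown over i = len(value), …, 0: first prefix value[:i] that is a dict key wins.
def pvGoB (v : List Char) (d : List (List Char × List Char)) (i : Nat) : List Char :=
  match d.lookup (PySem.List.slice v none (some (i : Int))) with             -- prefix = value[:i]; prefix in dict?
  | some replacement =>                                                      -- replacement = dict_legend[prefix]
    let suffix := PySem.List.slice v (some ((i : Int) + 1)) none             -- value[i+1:]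
    if suffix ≠ [] then PySem.Chars.strip (replacement ++ ' ' :: suffix) else replacement
  | none => if i = 0 then v else pvGoB v d (i - 1)
termination_by i
decreasing_by omega

def replace_longest_match_alt (value : String) (dict_legend : List (String × String)) : String :=
  String.ofList (pvGoB value.toList (dict_legend.map fun p => (p.1.toList, p.2.toList)) value.toList.length)

-- ===== PRECONDITION & SPEC =====
def Spec_replace_longest_match (value : String) (dict_legend : List (String × String)) (out : String) : Prop := out = replace_longest_match_alt value dict_legend
instance (value : String) (dict_legend : List (String × String)) (out : String) : Decidable (Spec_replace_longest_match value dict_legend out) := by unfold Spec_replace_longest_match; infer_instance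

-- ===== CLAIM (what is proved, stated in full; the proofs are below) =====
def Claim_equal_replace_longest_match : Prop := ∀ (value : String) (dict_legend : List (String × String)), Dom_replace_longest_match value dict_legend → Spec_replace_longest_match value dict_legend (replace_longest_match value dict_legend)

-- ===== LEMMAS AND PROOFS =====

-- the common output once the winning key `v.take m` (of length m) is fixed
def pvOut (v : List Char) (m : Nat) (r : List Char) : List Char :=
  if v.drop (m + 1) ≠ [] then PySem.Chars.strip (r ++ ' ' :: v.drop (m + 1)) else r

lemma pv_slice_from_succ (v : List Char) (i : Nat) :
    PySem.List.slice v (some ((i : Int) + 1)) none = v.drop (i + 1) := by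
  have h := PySem.List.slice_from_natCast v (i + 1)
  push_cast at h
  exact h

-- goA returns v when no key in the scanned list is a prefix of v
lemma pvGoA_all_miss (v : List Char) (d : List (List Char × List Char)) :
    ∀ ks : List (List Char), (∀ k ∈ ks, ¬ k <+: v) → pvGoA v d ks = v := by
  intro ks
  induction ks with
  | nil => intro _; simp [pvGoA]
  | cons k rest ih =>
    intro h
    have hk : ¬ PySem.Chars.startswith v k = true := by
      rw [PySem.Chars.startswith_iff]; exact h k (by simp)
    simp only [pvGoA, if_neg hk]
    exact ih fun k' hk' => h k' (by simp [hk'])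

-- goB returns v when no prefix v.take j (j ≤ i) is a key
lemma pvGoB_all_miss (v : List Char) (d : List (List Char × List Char)) :
    ∀ i : Nat, (∀ j, j ≤ i → d.lookup (v.take j) = none) → pvGoB v d i = v := by
  intro i
  induction i with
  | zero =>
    intro h
    rw [pvGoB, PySem.List.slice_to_natCast]
    rw [h 0 le_rfl]
    simp
  | succ i ih =>
    intro h
    rw [pvGoB, PySem.List.slice_to_natCast]
    rw [h (i + 1) le_rfl]
    simpa using ih fun j hj => h j (by omega)

-- goB walks down unchanged past indices whose prefix is not a key
lemma pvGoB_descend (v : List Char) (d : List (List Char × List Char)) (m : Nat) :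
    ∀ i : Nat, m ≤ i → (∀ j, m < j → j ≤ i → d.lookup (v.take j) = none) →
      pvGoB v d i = pvGoB v d m := by
  intro i
  induction i with
  | zero =>
    intro hm _
    have h0 : m = 0 := by omega
    rw [h0]
  | succ i ih =>
    intro hm h
    rcases Nat.eq_or_lt_of_le hm with h1 | h1
    · rw [h1]
    · rw [pvGoB, PySem.List.slice_to_natCast, h (i + 1) (by omega) le_rfl]
      simpa using ih (by omega) fun j hj1 hj2 => h j hj1 (by omega)

-- goB at the winning index
lemma pvGoB_hit (v : List Char) (d : List (List Char × List Char)) (m : Nat) (r : List Char)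
    (hr : d.lookup (v.take m) = some r) : pvGoB v d m = pvOut v m r := by
  rw [pvGoB, PySem.List.slice_to_natCast, hr, pv_slice_from_succ]
  rfl

-- Python-dict membership vs. lookup on the association list
lemma pv_lookup_isSome_of_mem (d : List (List Char × List Char)) (k : List Char)
    (hk : k ∈ d.map Prod.fst) : (d.lookup k).isSome = true := by
  rcases List.mem_map.mp hk with ⟨p, hp, he⟩
  exact List.lookup_isSome_iff.mpr ⟨p, hp, by simp [he]⟩

lemma pv_mem_of_lookup_isSome (d : List (List Char × List Char)) (k : List Char)
    (h : (d.lookup k).isSome = true) : k ∈ d.map Prod.fst := by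
  rcases List.lookup_isSome_iff.mp h with ⟨p, hp, he⟩
  exact List.mem_map.mpr ⟨p, hp, (beq_iff_eq.mp he).symm⟩

-- goA, scanning keys in weakly decreasing length order, hits exactly v.take m
lemma pvGoA_hit (v : List Char) (d : List (List Char × List Char)) (m : Nat)
    (hm : m ≤ v.length)
    (hbound : ∀ k, k ∈ d.map Prod.fst → k <+: v → k.length ≤ m) :
    ∀ ks : List (List Char), List.Pairwise (fun a b => b.length ≤ a.length) ks →
      (∀ k ∈ ks, k ∈ d.map Prod.fst) → v.take m ∈ ks →
      pvGoA v d ks = pvOut v m ((d.lookup (v.take m)).getD (v.take m)) := by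
  intro ks
  induction ks with
  | nil => intro _ _ h; simp at h
  | cons k rest ih =>
    intro hpw hsub hmem
    by_cases hs : PySem.Chars.startswith v k = true
    · have hpre : k <+: v := (PySem.Chars.startswith_iff v k).mp hs
      have hkm : k.length ≤ m := hbound k (hsub k (by simp)) hpre
      have hke : k = v.take m := by
        have hmk : m ≤ k.length := by
          rcases List.mem_cons.mp hmem with h1 | h1
          · rw [← h1]; simp [Nat.min_eq_left hm]
          · have := (List.pairwise_cons.mp hpw).1 _ h1
            simpa [Nat.min_eq_left hm] using this
        have hlen : k.length = m := le_antisymm hkm hmk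
        calc k = v.take k.length := List.prefix_iff_eq_take.mp hpre
        _ = v.take m := by rw [hlen]
      simp only [pvGoA, if_pos hs, pvOut]
      rw [hke, pv_slice_from_succ]
      have : (v.take m).length = m := by simp [Nat.min_eq_left hm]
      rw [this]
    · have hne : v.take m ≠ k := by
        intro he
        apply hs
        rw [PySem.Chars.startswith_iff, ← he]
        exact List.take_prefix m v
      have hmem' : v.take m ∈ rest := by
        rcases List.mem_cons.mp hmem with h1 | h1
        · exact absurd h1 hne
        · exact h1
      simp only [pvGoA, if_neg hs]
      exact ih (List.pairwise_cons.mp hpw).2 (fun k' hk' => hsub k' (by simp [hk'])) hmem'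

-- the char-level equivalence
lemma pvGoB_eq_pvGoA (v : List Char) (d : List (List Char × List Char)) :
    pvGoB v d v.length =
      pvGoA v d (PySem.List.sorted (d.map Prod.fst) List.length true) := by
  by_cases hex : ∃ j, j ≤ v.length ∧ (d.lookup (v.take j)).isSome
  · obtain ⟨j, hj, hPj⟩ := hex
    set P : Nat → Prop := fun j => (d.lookup (v.take j)).isSome = true with hP
    set m : Nat := Nat.findGreatest P v.length with hmdef
    have hm_le : m ≤ v.length := Nat.findGreatest_le v.length
    have hPm : P m := Nat.findGreatest_spec hj hPj
    have hmax : ∀ j', m < j' → j' ≤ v.length → d.lookup (v.take j') = none := by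
      intro j' h1 h2
      have h3 : ¬ P j' := Nat.findGreatest_is_greatest h1 h2
      rw [hP] at h3
      exact Option.not_isSome_iff_eq_none.mp (by simpa using h3)
    obtain ⟨r, hr⟩ := Option.isSome_iff_exists.mp hPm
    have hbound : ∀ k, k ∈ d.map Prod.fst → k <+: v → k.length ≤ m := by
      intro k hk hpre
      have hkeq : k = v.take k.length := List.prefix_iff_eq_take.mp hpre
      have hklen : k.length ≤ v.length := hpre.length_le
      have hPk : P k.length := by
        rw [hP]
        simp only
        rw [← hkeq]
        exact pv_lookup_isSome_of_mem d k hk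
      exact Nat.le_findGreatest hklen hPk
    rw [pvGoB_descend v d m v.length hm_le hmax, pvGoB_hit v d m r hr]
    rw [pvGoA_hit v d m hm_le hbound _
      (PySem.List.sorted_pairwise_rev (d.map Prod.fst) List.length)
      (fun k hk => (PySem.List.mem_sorted (d.map Prod.fst) List.length true k).mp hk)
      ((PySem.List.mem_sorted (d.map Prod.fst) List.length true (v.take m)).mpr
        (pv_mem_of_lookup_isSome d (v.take m) (by rw [hr]; rfl)))]
    rw [hr]
    rfl
  · simp only [not_exists, not_and] at hex
    have hnone : ∀ j, j ≤ v.length → d.lookup (v.take j) = none := by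
      intro j hj
      have h3 := hex j hj
      exact Option.not_isSome_iff_eq_none.mp (by simpa using h3)
    rw [pvGoB_all_miss v d v.length hnone]
    rw [pvGoA_all_miss v d _ ?_]
    intro k hk hpre
    have hk' : k ∈ d.map Prod.fst :=
      (PySem.List.mem_sorted (d.map Prod.fst) List.length true k).mp hk
    have hkeq : k = v.take k.length := List.prefix_iff_eq_take.mp hpre
    have h4 := hnone k.length hpre.length_le
    rw [← hkeq] at h4
    have h5 := pv_lookup_isSome_of_mem d k hk'
    rw [h4] at h5
    simp at h5

-- ===== VERDICT (by name: the statement is the Claim_ definition above) =====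
theorem replace_longest_match_spec : Claim_equal_replace_longest_match := by
  intro value dict_legend _
  unfold Spec_replace_longest_match replace_longest_match replace_longest_match_alt
  rw [pvGoB_eq_pvGoA]
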